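-- pv_equiv track=rewrite | github.com/joshloh/advent-of-code-2020 | day10-1.py | solve
-- ===== SOURCE A (Python) =====
-- def solve(array):
-- 	array.append(0)
-- 	array.sort()
-- 	count1 = 0
-- 	count3 = 1
-- 	for i in range(len(array)-1):
-- 		if array[i+1] - array[i] == 1:
-- 			count1 += 1
-- 		elif array[i+1] - array[i] == 3:
-- 			count3 += 1
-- 	return count1 * count3
-- ===== SOURCE B (Python) =====
-- def solve(array):
--     array.append(0)
--     s = set(array)
--     count1 = sum(1 for x in s if x + 1 in s)
--     count3 = sum(1 for x in s if x + 3 in s and x + 1 not in s and x + 2 not in s)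
--     return count1 * (count3 + 1)
-- ===== Notes on version B (the rewrite author's own statement) =====
-- stated objective: alternative
-- what changed: B drops the sort-and-scan entirely: it puts array plus 0 into a set and counts, over distinct values x, those with x+1 present (gap-1 pairs) and those with x+3 present but x+1 and x+2 absent (gap-3 pairs), returning count1 * (count3 + 1); this is correct because in the sorted multiset each positive adjacent gap occurs exactly once between consecutive distinct values.
import Mathlib
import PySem

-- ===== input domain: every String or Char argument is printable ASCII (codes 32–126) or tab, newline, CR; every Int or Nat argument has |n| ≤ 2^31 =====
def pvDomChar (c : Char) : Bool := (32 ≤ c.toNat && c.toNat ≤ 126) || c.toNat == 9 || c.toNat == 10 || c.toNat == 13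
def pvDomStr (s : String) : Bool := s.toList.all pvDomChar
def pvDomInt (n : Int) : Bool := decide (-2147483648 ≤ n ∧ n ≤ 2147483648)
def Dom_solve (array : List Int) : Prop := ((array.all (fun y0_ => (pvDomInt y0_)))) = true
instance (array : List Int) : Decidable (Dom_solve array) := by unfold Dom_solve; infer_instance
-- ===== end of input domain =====

-- B counts set-membership patterns (x and x+1 both present; x and x+3 present with x+1,x+2 absent)
-- instead of A's sort + scan of adjacent differences; equivalence is about the return value only:
-- A sorts the argument in place, B only appends 0 to it.

-- ===== PORT A =====
def solve (array : List Int) : Int :=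
  let arr := PySem.List.sorted (array ++ [0]) (fun x => x) false
  let c := (PySem.List.pyRange 0 (PySem.List.len arr - 1) 1).foldl
    (fun (c : Int × Int) i =>
      if PySem.List.pyGetD arr (i + 1) 0 - PySem.List.pyGetD arr i 0 == 1 then (c.1 + 1, c.2)
      else if PySem.List.pyGetD arr (i + 1) 0 - PySem.List.pyGetD arr i 0 == 3 then (c.1, c.2 + 1)
      else c)
    (0, 1)
  c.1 * c.2

-- ===== PORT B =====
def solve_alt (array : List Int) : Int :=
  let s : PySem.Set Int := PySem.Set.ofList (array ++ [0])
  let count1 : Int := s.foldl (fun acc x => if s.contains (x + 1) then acc + 1 else acc) 0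
  let count3 : Int := s.foldl
    (fun acc x => if s.contains (x + 3) && !s.contains (x + 1) && !s.contains (x + 2)
      then acc + 1 else acc) 0
  count1 * (count3 + 1)

-- ===== PRECONDITION & SPEC =====
def Spec_solve (array : List Int) (out : Int) : Prop := out = solve_alt array
instance (array : List Int) (out : Int) : Decidable (Spec_solve array out) := by unfold Spec_solve; infer_instance

-- ===== CLAIM (what is proved, stated in full; the proofs are below) =====
def Claim_equal_solve : Prop := ∀ (array : List Int), Dom_solve array → Spec_solve array (solve array)

-- ===== LEMMAS AND PROOFS =====

-- A's index-generated differences are exactly the adjacent gaps of the zip form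
lemma gaps_eq (l : List Int) :
    (PySem.List.pyRange 0 (PySem.List.len l - 1) 1).map
      (fun i => PySem.List.pyGetD l (i + 1) 0 - PySem.List.pyGetD l i 0)
    = (l.zip (l.drop 1)).map (fun p => p.2 - p.1) := by
  apply List.ext_getElem
  · simp [PySem.List.length_pyRange_one, PySem.List.len]
  · intro k h1 h2
    have hk : k + 1 < l.length := by
      simp [PySem.List.length_pyRange_one, PySem.List.len] at h1
      omega
    have hc : ((k : Int) + 1) = ((k + 1 : Nat) : Int) := by push_cast; ring
    simp only [List.getElem_map, PySem.List.getElem_pyRange_one, List.getElem_zip,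
      List.getElem_drop, zero_add, hc, PySem.List.pyGetD_natCast]
    rw [List.getD_eq_getElem _ _ hk, List.getD_eq_getElem _ _ (Nat.lt_of_succ_lt hk)]
    simp [Nat.add_comm]

-- folding A's counter body over the list of gaps adds (count 1, count 3)
lemma fold_count (gs : List Int) : ∀ (a b : Int),
    gs.foldl (fun (c : Int × Int) d =>
        if d == 1 then (c.1 + 1, c.2) else if d == 3 then (c.1, c.2 + 1) else c) (a, b)
    = (a + List.count 1 gs, b + List.count 3 gs) := by
  induction gs with
  | nil => intro a b; simp
  | cons x t ih =>
    intro a b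
    simp only [List.foldl_cons]
    by_cases h1 : x = 1
    · subst h1
      simp only [show ((1:Int) == 1) = true from rfl, if_true]
      rw [ih]
      simp
      ring
    · by_cases h3 : x = 3
      · subst h3
        simp only [show ((3:Int) == 1) = true ↔ False by decide, show ((3:Int) == 3) = true from rfl,
          if_true, if_false]
        rw [ih]
        simp [h1]
        ring
      · simp only [show (x == 1) = true ↔ False by simp [h1], show (x == 3) = true ↔ False by simp [h3], if_false]
        rw [ih]
        simp [h1, h3]

-- every element of a sorted cons list is at least the head
lemma head_min {y : Int} {t : List Int} (hp : (y :: t).Pairwise (· ≤ ·)) :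
    ∀ z ∈ y :: t, y ≤ z := by
  intro z hz
  rcases List.mem_cons.mp hz with h | h
  · omega
  · exact (List.pairwise_cons.mp hp).1 z h

-- number of adjacent gaps equal to 1 in a sorted list = number of distinct x with x+1 also present
lemma gap_count_one : ∀ (L : List Int), L.Pairwise (· ≤ ·) →
    List.count 1 ((L.zip (L.drop 1)).map (fun p => p.2 - p.1))
    = L.dedup.countP (fun x => decide ((x + 1) ∈ L)) := by
  intro L
  induction L with
  | nil => intro _; simp
  | cons x t ih =>
    intro hp
    cases t with
    | nil =>
      simp [show ¬ (x + 1 = x) by omega]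
    | cons y t' =>
      have hxy : x ≤ y := (List.pairwise_cons.mp hp).1 y (by simp)
      have hpt : (y :: t').Pairwise (· ≤ ·) := (List.pairwise_cons.mp hp).2
      have hmin : ∀ z ∈ y :: t', y ≤ z := head_min hpt
      have hzip : ((x :: y :: t').zip ((x :: y :: t').drop 1)).map (fun p => p.2 - p.1)
          = (y - x) :: (((y :: t').zip t').map (fun p => p.2 - p.1)) := by simp
      rw [hzip]
      by_cases heq : x = y
      · subst heq
        rw [List.count_cons]
        have hd : (x :: x :: t').dedup = (x :: t').dedup := List.dedup_cons_of_mem (by simp)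
        have ih' := ih hpt
        rw [show List.drop 1 (x :: t') = t' from rfl] at ih'
        rw [hd, ih']
        have : (x :: t').dedup.countP (fun z => decide ((z + 1) ∈ x :: t'))
            = (x :: t').dedup.countP (fun z => decide ((z + 1) ∈ x :: x :: t')) := by
          apply List.countP_congr
          intro a _
          simp [List.mem_cons]
        rw [← this]
        simp
      · have hlt : x < y := lt_of_le_of_ne hxy heq
        have hnm : x ∉ y :: t' := by
          intro hmem
          have := hmin x hmem
          omega
        have ih' := ih hpt
        rw [show List.drop 1 (y :: t') = t' from rfl] at ih'
        rw [List.dedup_cons_of_notMem hnm, List.countP_cons, List.count_cons, ih']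
        have hmem1 : ((x + 1) ∈ y :: t') ↔ y = x + 1 := by
          constructor
          · intro h; have := hmin _ h; omega
          · intro h; simp [← h]
        have hcong : (y :: t').dedup.countP (fun z => decide ((z + 1) ∈ y :: t'))
            = (y :: t').dedup.countP (fun z => decide ((z + 1) ∈ x :: y :: t')) := by
          apply List.countP_congr
          intro a ha
          have haz : y ≤ a := hmin a (List.mem_dedup.mp ha)
          simp only [List.mem_cons, decide_eq_true_eq]
          constructor
          · tauto
          · rintro (h | h) <;> [omega; tauto]
        rw [← hcong]
        have hx : (decide ((x + 1) ∈ x :: y :: t')) = decide (y = x + 1) := by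
          simp only [List.mem_cons, show ¬ (x + 1 = x) by omega, false_or]
          by_cases h : y = x + 1 <;> simp [h, hmem1] <;> tauto
        rw [hx]
        have hg : (y - x = 1) ↔ (y = x + 1) := by omega
        by_cases h : y = x + 1 <;> simp [h, hg] <;> omega

-- number of adjacent gaps equal to 3 in a sorted list
-- = number of distinct x with x+3 present and x+1, x+2 absent
lemma gap_count_three : ∀ (L : List Int), L.Pairwise (· ≤ ·) →
    List.count 3 ((L.zip (L.drop 1)).map (fun p => p.2 - p.1))
    = L.dedup.countP (fun x => decide ((x + 3) ∈ L) && !decide ((x + 1) ∈ L) && !decide ((x + 2) ∈ L)) := by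
  intro L
  induction L with
  | nil => intro _; simp
  | cons x t ih =>
    intro hp
    cases t with
    | nil =>
      simp [show ¬ (x + 3 = x) by omega]
    | cons y t' =>
      have hxy : x ≤ y := (List.pairwise_cons.mp hp).1 y (by simp)
      have hpt : (y :: t').Pairwise (· ≤ ·) := (List.pairwise_cons.mp hp).2
      have hmin : ∀ z ∈ y :: t', y ≤ z := head_min hpt
      have hzip : ((x :: y :: t').zip ((x :: y :: t').drop 1)).map (fun p => p.2 - p.1)
          = (y - x) :: (((y :: t').zip t').map (fun p => p.2 - p.1)) := by simp
      rw [hzip]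
      by_cases heq : x = y
      · subst heq
        rw [List.count_cons]
        have hd : (x :: x :: t').dedup = (x :: t').dedup := List.dedup_cons_of_mem (by simp)
        have ih' := ih hpt
        rw [show List.drop 1 (x :: t') = t' from rfl] at ih'
        rw [hd, ih']
        have : ∀ (a : Int), (a ∈ x :: x :: t') ↔ (a ∈ x :: t') := by
          intro a; simp [List.mem_cons]
        have hc : (x :: t').dedup.countP
              (fun z => decide ((z + 3) ∈ x :: t') && !decide ((z + 1) ∈ x :: t') && !decide ((z + 2) ∈ x :: t'))
            = (x :: t').dedup.countP
              (fun z => decide ((z + 3) ∈ x :: x :: t') && !decide ((z + 1) ∈ x :: x :: t') && !decide ((z + 2) ∈ x :: x :: t')) := by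
          apply List.countP_congr
          intro a _
          simp [this]
        rw [← hc]
        simp
      · have hlt : x < y := lt_of_le_of_ne hxy heq
        have hnm : x ∉ y :: t' := by
          intro hmem; have := hmin x hmem; omega
        have ih' := ih hpt
        rw [show List.drop 1 (y :: t') = t' from rfl] at ih'
        rw [List.dedup_cons_of_notMem hnm, List.countP_cons, List.count_cons, ih']
        have hcong : (y :: t').dedup.countP
              (fun z => decide ((z + 3) ∈ y :: t') && !decide ((z + 1) ∈ y :: t') && !decide ((z + 2) ∈ y :: t'))
            = (y :: t').dedup.countP
              (fun z => decide ((z + 3) ∈ x :: y :: t') && !decide ((z + 1) ∈ x :: y :: t') && !decide ((z + 2) ∈ x :: y :: t')) := by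
          apply List.countP_congr
          intro a ha
          have haz : y ≤ a := hmin a (List.mem_dedup.mp ha)
          have h1 : ((a + 1) ∈ x :: y :: t') ↔ ((a + 1) ∈ y :: t') := by
            simp only [List.mem_cons]; constructor
            · rintro (h | h); · omega
              · tauto
            · tauto
          have h2 : ((a + 2) ∈ x :: y :: t') ↔ ((a + 2) ∈ y :: t') := by
            simp only [List.mem_cons]; constructor
            · rintro (h | h); · omega
              · tauto
            · tauto
          have h3 : ((a + 3) ∈ x :: y :: t') ↔ ((a + 3) ∈ y :: t') := by
            simp only [List.mem_cons]; constructor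
            · rintro (h | h); · omega
              · tauto
            · tauto
          simp [h1, h2, h3]
        rw [← hcong]
        have hx : ((decide ((x + 3) ∈ x :: y :: t') && !decide ((x + 1) ∈ x :: y :: t') && !decide ((x + 2) ∈ x :: y :: t')) = true)
            ↔ y = x + 3 := by
          simp only [Bool.and_eq_true, Bool.not_eq_true', decide_eq_true_eq, decide_eq_false_iff_not,
            List.mem_cons]
          constructor
          · rintro ⟨⟨h3, h1⟩, h2⟩
            have hy1 : ¬ (x + 1 = y) := fun hc => h1 (Or.inr (Or.inl hc))
            have hy2 : ¬ (x + 2 = y) := fun hc => h2 (Or.inr (Or.inl hc))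
            rcases h3 with h | h | h
            · omega
            · omega
            · have := hmin _ (List.mem_cons.mpr (Or.inr h)); omega
          · intro h
            refine ⟨⟨Or.inr (Or.inl h.symm), ?_⟩, ?_⟩
            · rintro (hc | hc | hc)
              · omega
              · omega
              · have := hmin _ (List.mem_cons.mpr (Or.inr hc)); omega
            · rintro (hc | hc | hc)
              · omega
              · omega
              · have := hmin _ (List.mem_cons.mpr (Or.inr hc)); omega
        have hg : (y - x = 3) ↔ (y = x + 3) := by omega
        by_cases h : y = x + 3
        · rw [if_pos (hx.mpr h)]
          simp [h]
        · rw [if_neg (fun hc => h (hx.mp hc))]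
          have : ¬ (y - x = 3) := by omega
          simp [this]

-- the set of array+[0] and the dedup of its sorted version are permutations with the same members
lemma set_perm (array : List Int) :
    (PySem.Set.ofList (array ++ [0])).Perm
      (PySem.List.sorted (array ++ [0]) (fun x => x) false).dedup := by
  rw [List.perm_ext_iff_of_nodup (PySem.Set.nodup_ofList _) (List.nodup_dedup _)]
  intro a
  rw [PySem.Set.mem_ofList, List.mem_dedup, PySem.List.mem_sorted]

-- ===== VERDICT (by name: the statement is the Claim_ definition above) =====
theorem solve_spec : Claim_equal_solve := by
  intro array _
  unfold Spec_solve solve solve_alt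
  dsimp only
  set L := PySem.List.sorted (array ++ [0]) (fun x => x) false with hL
  set s := PySem.Set.ofList (array ++ [0]) with hs
  have hpw : L.Pairwise (· ≤ ·) := PySem.List.sorted_pairwise (array ++ [0]) (fun x => x)
  -- A side: fold over pyRange = counts of gaps 1 and 3
  rw [← List.foldl_map
    (f := fun i => PySem.List.pyGetD L (i + 1) 0 - PySem.List.pyGetD L i 0)
    (g := fun (c : Int × Int) d => if d == 1 then (c.1 + 1, c.2)
      else if d == 3 then (c.1, c.2 + 1) else c)]
  rw [gaps_eq, fold_count]
  -- B side: the two folds are countP over the set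
  rw [show (fun (acc : Int) (x : Int) => if s.contains (x + 1) then acc + 1 else acc)
      = (fun acc x => if (fun z => s.contains (z + 1)) x then acc + 1 else acc) from rfl]
  rw [PySem.List.foldl_count_if]
  rw [show (fun (acc : Int) (x : Int) =>
        if s.contains (x + 3) && !s.contains (x + 1) && !s.contains (x + 2) then acc + 1 else acc)
      = (fun acc x => if (fun z => s.contains (z + 3) && !s.contains (z + 1) && !s.contains (z + 2)) x
          then acc + 1 else acc) from rfl]
  rw [PySem.List.foldl_count_if]
  -- countP over the set = countP over L.dedup, with membership in s rewritten to membership in L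
  have hc1 : s.countP (fun z => s.contains (z + 1))
      = L.dedup.countP (fun z => decide ((z + 1) ∈ L)) := by
    rw [(set_perm array).countP_eq]
    apply List.countP_congr
    intro a _
    simp [PySem.Set.contains, hs, hL, PySem.Set.mem_ofList, PySem.List.mem_sorted]
  have hc3 : s.countP (fun z => s.contains (z + 3) && !s.contains (z + 1) && !s.contains (z + 2))
      = L.dedup.countP (fun z => decide ((z + 3) ∈ L) && !decide ((z + 1) ∈ L) && !decide ((z + 2) ∈ L)) := by
    rw [(set_perm array).countP_eq]
    apply List.countP_congr
    intro a _
    simp [PySem.Set.contains, hs, hL, PySem.Set.mem_ofList, PySem.List.mem_sorted]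
  rw [hc1, hc3, ← gap_count_one L hpw, ← gap_count_three L hpw]
  push_cast
  ring
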